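-- pv_equiv track=rewrite | github.com/benjjo/leetcode | main.py | make_powers
-- ===== SOURCE A (Python) =====
-- def make_powers(n):
--     powers = list()
--     big_bin = 0b100000000000000000000000000000
--     while big_bin:
--         if big_bin & n:
--             powers.append(big_bin)
--         big_bin = big_bin >> 1
--     powers.sort()
--     return powers
-- ===== SOURCE B (Python) =====
-- def make_powers(n):
--     n &= (1 << 30) - 1
--     powers = []
--     while n:
--         powers.append(n & -n)
--         n &= n - 1
--     return powers
-- ===== Notes on version B (the rewrite author's own statement) =====
-- stated objective: idiomatic
-- what changed: A tests each of the thirty fixed bit positions from the top down and then sorts the collected powers; B masks n to its low thirty bits once and then repeatedly extracts the lowest set bit (n & -n) and clears it (n &= n - 1), producing the powers already in ascending order with no sort and iterating only over the set bits.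
import Mathlib
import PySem

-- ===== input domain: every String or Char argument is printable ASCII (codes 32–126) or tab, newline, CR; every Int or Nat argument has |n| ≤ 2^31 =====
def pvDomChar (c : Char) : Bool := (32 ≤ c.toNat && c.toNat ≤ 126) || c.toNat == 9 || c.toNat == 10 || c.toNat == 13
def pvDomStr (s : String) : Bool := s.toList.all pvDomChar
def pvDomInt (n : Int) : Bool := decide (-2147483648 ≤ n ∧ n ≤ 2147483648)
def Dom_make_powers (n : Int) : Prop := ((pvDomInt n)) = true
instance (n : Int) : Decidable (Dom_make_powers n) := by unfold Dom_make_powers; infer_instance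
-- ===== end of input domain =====

-- B replaces A's fixed top-down scan of every bit position followed by a sort with a
-- loop that extracts the lowest set bit of the masked value, yielding the powers
-- already in ascending order (objective: idiomatic; no speed claim).

-- ===== PORT A =====
-- A's while-loop: big_bin stays in {2^29, 2^28, …, 1, 0}, a nonnegative int, so it is
-- carried as a Nat (cast to Int for the bitwise test `big_bin & n`, exact Python `&`).
def make_powers_go (big_bin : Nat) (n : Int) (powers : List Int) : List Int :=
  if big_bin = 0 then powers
  else make_powers_go (big_bin >>> 1) n
         (if (big_bin : Int).land n ≠ 0 then powers ++ [(big_bin : Int)] else powers)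
termination_by big_bin
decreasing_by simp only [Nat.shiftRight_one]; omega

def make_powers (n : Int) : List Int :=
  PySem.List.sorted (make_powers_go 0b100000000000000000000000000000 n []) (fun x => x) false

-- ===== PORT B =====
-- B's while-loop; after masking, the value is < 2^30 and loses one set bit per
-- iteration, so 30 iterations always suffice: fuel 30 is a pure totality guard.
def make_powers_alt_go (fuel : Nat) (m : Int) (powers : List Int) : List Int :=
  match fuel with
  | 0 => powers
  | fuel + 1 =>
    if m = 0 then powers
    else make_powers_alt_go fuel (m.land (m - 1)) (powers ++ [m.land (-m)])

def make_powers_alt (n : Int) : List Int :=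
  make_powers_alt_go 30 (n.land ((1 <<< 30 : Int) - 1)) []

-- ===== PRECONDITION & SPEC =====
def Spec_make_powers (n : Int) (out : List Int) : Prop := out = make_powers_alt n
instance (n : Int) (out : List Int) : Decidable (Spec_make_powers n out) := by unfold Spec_make_powers; infer_instance

-- ===== CLAIM (what is proved, stated in full; the proofs are below) =====
def Claim_equal_make_powers : Prop := ∀ (n : Int), Dom_make_powers n → Spec_make_powers n (make_powers n)

-- ===== LEMMAS AND PROOFS =====

-- the low 30 bits of n, as a Nat
def maskNat (n : Int) : Nat :=
  match n with
  | Int.ofNat c => c % 2 ^ 30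
  | Int.negSucc d => (2 ^ 30 - 1).ldiff d

-- popcount
def popcnt (a : Nat) : Nat :=
  if a = 0 then 0 else a % 2 + popcnt (a / 2)
termination_by a
decreasing_by omega

-- ascending list of the powers of two present in a
def ascBits (a : Nat) : List Int :=
  if a = 0 then [] else (if a % 2 = 1 then [(1 : Int)] else []) ++ (ascBits (a / 2)).map (· * 2)
termination_by a
decreasing_by omega

theorem ascBits_two_mul (b : Nat) : ascBits (2 * b) = (ascBits b).map (· * 2) := by
  rcases Nat.eq_zero_or_pos b with hb | hb
  · subst hb; simp [ascBits]
  · rw [ascBits]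
    have h1 : ¬ (2 * b = 0) := by omega
    have h2 : 2 * b % 2 = 0 := by omega
    have h3 : 2 * b / 2 = b := by omega
    simp [h1, h2, h3]

theorem nat_and_pred_odd (a : Nat) (h : a % 2 = 1) : a &&& (a - 1) = a - 1 := by
  apply Nat.eq_of_testBit_eq
  intro i
  rw [Nat.testBit_land]
  cases i with
  | zero =>
    have h2 : (a - 1) % 2 = 0 := by omega
    simp [Nat.testBit_zero, h, h2]
  | succ i =>
    simp only [Nat.testBit_succ]
    rw [show (a - 1) / 2 = a / 2 by omega]
    simp

theorem nat_ldiff_pred_odd (a : Nat) (h : a % 2 = 1) : a.ldiff (a - 1) = 1 := by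
  apply Nat.eq_of_testBit_eq
  intro i
  rw [Nat.testBit_ldiff]
  cases i with
  | zero =>
    have h2 : (a - 1) % 2 = 0 := by omega
    simp [Nat.testBit_zero, h, h2]
  | succ i =>
    simp only [Nat.testBit_succ]
    rw [show (a - 1) / 2 = a / 2 by omega]
    simp [Nat.div_eq_of_lt]

theorem nat_and_pred_even (b : Nat) (hb : b ≠ 0) :
    (2 * b) &&& (2 * b - 1) = 2 * (b &&& (b - 1)) := by
  apply Nat.eq_of_testBit_eq
  intro i
  rw [Nat.testBit_land]
  cases i with
  | zero =>
    have h1 : 2 * b % 2 = 0 := by omega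
    have h2 : 2 * (b &&& (b - 1)) % 2 = 0 := by omega
    simp [Nat.testBit_zero, h1, h2]
  | succ i =>
    simp only [Nat.testBit_succ]
    rw [show 2 * b / 2 = b by omega, show (2 * b - 1) / 2 = b - 1 by omega,
        show 2 * (b &&& (b - 1)) / 2 = b &&& (b - 1) by omega, Nat.testBit_land]

theorem nat_ldiff_pred_even (b : Nat) (hb : b ≠ 0) :
    (2 * b).ldiff (2 * b - 1) = 2 * (b.ldiff (b - 1)) := by
  apply Nat.eq_of_testBit_eq
  intro i
  rw [Nat.testBit_ldiff]
  cases i with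
  | zero =>
    have h1 : 2 * b % 2 = 0 := by omega
    have h2 : 2 * (b.ldiff (b - 1)) % 2 = 0 := by omega
    simp [Nat.testBit_zero, h1, h2]
  | succ i =>
    simp only [Nat.testBit_succ]
    rw [show 2 * b / 2 = b by omega, show (2 * b - 1) / 2 = b - 1 by omega,
        show 2 * (b.ldiff (b - 1)) / 2 = b.ldiff (b - 1) by omega, Nat.testBit_ldiff]

theorem ascBits_cons (a : Nat) (ha : a ≠ 0) :
    ascBits a = ((a.ldiff (a - 1) : Nat) : Int) :: ascBits (a &&& (a - 1)) := by
  induction a using Nat.strong_induction_on with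
  | _ a ih =>
    rcases Nat.even_or_odd a with he | ho
    · -- a even, a = 2*b with b ≠ 0
      obtain ⟨b, hb⟩ := he
      have hb2 : a = 2 * b := by omega
      have hbne : b ≠ 0 := by omega
      subst hb2
      rw [nat_and_pred_even b hbne, nat_ldiff_pred_even b hbne,
          ascBits_two_mul, ascBits_two_mul, ih b (by omega) hbne]
      push_cast
      simp [mul_comm]
    · -- a odd
      have h1 : a % 2 = 1 := Nat.odd_iff.mp ho
      rw [nat_and_pred_odd a h1, nat_ldiff_pred_odd a h1]
      have ha1 : a - 1 = 2 * (a / 2) := by omega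
      rw [ascBits, if_neg ha, if_pos h1, ha1, ascBits_two_mul]
      simp

theorem popcnt_two_mul (b : Nat) : popcnt (2 * b) = popcnt b := by
  rcases Nat.eq_zero_or_pos b with hb | hb
  · subst hb; simp
  · rw [popcnt]
    have h1 : ¬ (2 * b = 0) := by omega
    have h2 : 2 * b % 2 = 0 := by omega
    have h3 : 2 * b / 2 = b := by omega
    simp [h1, h2, h3]

theorem popcnt_pos (a : Nat) (ha : a ≠ 0) : 0 < popcnt a := by
  induction a using Nat.strong_induction_on with
  | _ a ih =>
    rw [popcnt, if_neg ha]
    rcases Nat.eq_zero_or_pos (a % 2) with h | h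
    · have : a / 2 ≠ 0 := by omega
      have := ih (a / 2) (by omega) this
      omega
    · omega

theorem popcnt_clear (a : Nat) (ha : a ≠ 0) : popcnt (a &&& (a - 1)) + 1 = popcnt a := by
  induction a using Nat.strong_induction_on with
  | _ a ih =>
    rcases Nat.even_or_odd a with he | ho
    · obtain ⟨b, hb⟩ := he
      have hb2 : a = 2 * b := by omega
      have hbne : b ≠ 0 := by omega
      subst hb2
      rw [nat_and_pred_even b hbne, popcnt_two_mul, popcnt_two_mul, ih b (by omega) hbne]
    · have h1 : a % 2 = 1 := Nat.odd_iff.mp ho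
      rw [nat_and_pred_odd a h1]
      have ha1 : a - 1 = 2 * (a / 2) := by omega
      rw [ha1, popcnt_two_mul]
      conv_rhs => rw [popcnt, if_neg ha]
      omega

theorem popcnt_le (k : Nat) : ∀ a, a < 2 ^ k → popcnt a ≤ k := by
  induction k with
  | zero => intro a ha; interval_cases a; simp [popcnt]
  | succ k ih =>
    intro a ha
    rcases Nat.eq_zero_or_pos a with h | h
    · subst h; simp [popcnt]
    · rw [popcnt, if_neg (by omega)]
      have : a / 2 < 2 ^ k := by
        have := Nat.pow_succ 2 k ▸ ha; omega
      have := ih (a / 2) this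
      omega

-- cast bridges from B's Int-level bit operations to Nat
theorem int_land_pred (a : Nat) (ha : a ≠ 0) :
    ((a : Int)).land ((a : Int) - 1) = ((a &&& (a - 1) : Nat) : Int) := by
  obtain ⟨b, rfl⟩ := Nat.exists_eq_succ_of_ne_zero ha
  have h1 : ((b + 1 : Nat) : Int) - 1 = ((b : Nat) : Int) := by push_cast; ring
  rw [h1]
  rfl

theorem int_land_neg (a : Nat) (ha : a ≠ 0) :
    ((a : Int)).land (-(a : Int)) = ((a.ldiff (a - 1) : Nat) : Int) := by
  obtain ⟨b, rfl⟩ := Nat.exists_eq_succ_of_ne_zero ha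
  have h1 : -((b + 1 : Nat) : Int) = Int.negSucc b := by
    simp [Int.negSucc_eq]
  rw [h1]
  rfl

theorem alt_go_spec (fuel : Nat) : ∀ (a : Nat) (acc : List Int), popcnt a ≤ fuel →
    make_powers_alt_go fuel (a : Int) acc = acc ++ ascBits a := by
  induction fuel with
  | zero =>
    intro a acc h
    have ha : a = 0 := by
      by_contra h0
      have := popcnt_pos a h0
      omega
    subst ha
    simp [make_powers_alt_go, ascBits]
  | succ fuel ih =>
    intro a acc h
    rcases Nat.eq_zero_or_pos a with h0 | h0
    · subst h0; simp [make_powers_alt_go, ascBits]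
    · have ha : a ≠ 0 := by omega
      have hcast : ((a : Int)) ≠ 0 := by exact_mod_cast ha
      rw [make_powers_alt_go, if_neg hcast, int_land_pred a ha, int_land_neg a ha,
          ih (a &&& (a - 1)) _ (by have := popcnt_clear a ha; omega),
          ascBits_cons a ha]
      simp

-- B's masked value is maskNat n, a Nat below 2^30
theorem mask_eq (n : Int) : n.land ((1 <<< 30 : Int) - 1) = ((maskNat n : Nat) : Int) := by
  cases n with
  | ofNat c =>
    show (Int.ofNat c).land (Int.ofNat (2 ^ 30 - 1)) = _
    show ((c &&& (2 ^ 30 - 1) : Nat) : Int) = _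
    rw [Nat.and_two_pow_sub_one_eq_mod]
    rfl
  | negSucc d => rfl

theorem ldiff_lt (d : Nat) : (2 ^ 30 - 1).ldiff d < 2 ^ 30 := by
  apply Nat.lt_pow_two_of_testBit
  intro i hi
  rw [Nat.testBit_ldiff, Nat.testBit_two_pow_sub_one]
  simp
  omega

theorem maskNat_lt (n : Int) : maskNat n < 2 ^ 30 := by
  cases n with
  | ofNat c => exact Nat.mod_lt _ (by norm_num)
  | negSucc d => exact ldiff_lt d

-- A's bit test agrees with the bits of maskNat n on positions below 30
theorem bit_bridge (n : Int) (j : Nat) (hj : j < 30) :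
    (((2 ^ j : Nat) : Int).land n ≠ 0 ↔ (maskNat n).testBit j = true) := by
  cases n with
  | ofNat c =>
    show ((2 ^ j &&& c : Nat) : Int) ≠ 0 ↔ _
    rw [Nat.land_comm, Nat.and_two_pow]
    show _ ↔ (c % 2 ^ 30).testBit j = true
    rw [Nat.testBit_mod_two_pow]
    cases h : c.testBit j <;> simp [h, hj]
  | negSucc d =>
    show (((2 ^ j).ldiff d : Nat) : Int) ≠ 0 ↔ _
    show _ ↔ ((2 ^ 30 - 1).ldiff d).testBit j = true
    rw [Nat.testBit_ldiff, Nat.testBit_two_pow_sub_one]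
    have hval : (2 ^ j).ldiff d = if d.testBit j then 0 else 2 ^ j := by
      apply Nat.eq_of_testBit_eq
      intro i
      rw [Nat.testBit_ldiff, Nat.testBit_two_pow]
      by_cases hij : j = i
      · subst hij; cases h : d.testBit j <;> simp [h]
      · cases h : d.testBit j <;> simp [h, hij, Nat.testBit_two_pow]
    rw [hval]
    cases h : d.testBit j <;> simp [h, hj]

-- the ascending reference list: powers of the set bits of a among positions < k
theorem ascBits_ref (k : Nat) : ∀ a, a < 2 ^ k →
    ascBits a = ((List.range k).filter (fun i => a.testBit i)).map (fun i => ((2 ^ i : Nat) : Int)) := by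
  induction k with
  | zero => intro a ha; interval_cases a; simp [ascBits]
  | succ k ih =>
    intro a ha
    rcases Nat.eq_zero_or_pos a with h0 | h0
    · subst h0; simp [ascBits]
    · rw [ascBits, if_neg (by omega), List.range_succ_eq_map]
      have ha2 : a / 2 < 2 ^ k := by
        have := Nat.pow_succ 2 k ▸ ha; omega
      rw [ih (a / 2) ha2]
      have key : ((((List.range k).filter fun i => (a / 2).testBit i).map
            (fun i => ((2 ^ i : Nat) : Int))).map (· * 2)) =
          (((List.range k).filter fun i => (a / 2).testBit i).map
            (fun i => ((2 ^ (i + 1) : Nat) : Int))) := by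
        rw [List.map_map]
        apply List.map_congr_left
        intro i _
        simp only [Function.comp, pow_succ]
        push_cast
        ring
      rw [key]
      have hb0 : a.testBit 0 = decide (a % 2 = 1) := Nat.testBit_zero a
      by_cases hpar : a % 2 = 1
      · rw [if_pos hpar]
        simp only [List.filter_cons, hb0, hpar, List.filter_map, decide_true,
          List.map_cons, List.cons_append, List.nil_append, if_true]
        simp [List.map_map, Function.comp_def, Nat.succ_eq_add_one, Nat.testBit_succ]
      · rw [if_neg hpar]
        simp only [List.filter_cons, hb0, hpar, List.filter_map, decide_false,
          List.nil_append, if_false, Bool.false_eq_true]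
        simp [List.map_map, Function.comp_def, Nat.succ_eq_add_one, Nat.testBit_succ]

-- A's loop produces the powers of the set bits, largest first
theorem go_spec (n : Int) : ∀ (j : Nat) (acc : List Int), make_powers_go (2 ^ j) n acc =
    acc ++ (((List.range (j + 1)).filter
        (fun i => decide (((2 ^ i : Nat) : Int).land n ≠ 0))).map
        (fun i => ((2 ^ i : Nat) : Int))).reverse := by
  intro j
  induction j with
  | zero =>
    intro acc
    rw [pow_zero]
    rw [make_powers_go, if_neg one_ne_zero, show (1 : Nat) >>> 1 = 0 from rfl,
        make_powers_go, if_pos rfl]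
    by_cases h : ((1 : Nat) : Int).land n = 0
    · rw [if_neg (by simpa using h)]
      push_cast at h
      simp [List.filter, h]
    · rw [if_pos (by simpa using h)]
      push_cast at h
      simp [List.filter, h]
  | succ j ih =>
    intro acc
    rw [make_powers_go, if_neg (by positivity)]
    have hsh : 2 ^ (j + 1) >>> 1 = 2 ^ j := by
      rw [Nat.shiftRight_one, pow_succ]; omega
    rw [hsh, ih]
    rw [List.range_succ (n := j + 1), List.filter_append, List.map_append,
        List.reverse_append]
    by_cases h : ((2 ^ (j + 1) : Nat) : Int).land n = 0
    · rw [if_neg (by simpa using h)]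
      push_cast at h
      simp [List.filter, h]
    · rw [if_pos (by simpa using h)]
      push_cast at h
      simp [List.filter, h]

-- the ascending reference list is strictly increasing
theorem ref_pairwise (n : Int) :
    (((List.range 30).filter
        (fun i => decide (((2 ^ i : Nat) : Int).land n ≠ 0))).map
        (fun i => ((2 ^ i : Nat) : Int))).Pairwise (fun a b => a < b) := by
  rw [List.pairwise_map]
  apply List.Pairwise.filter
  apply List.pairwise_lt_range.imp
  intro i j hij
  exact_mod_cast Nat.pow_lt_pow_right (by norm_num) hij

-- ===== VERDICT (by name: the statement is the Claim_ definition above) =====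
theorem make_powers_spec : Claim_equal_make_powers := by
  intro n _
  unfold Spec_make_powers
  have hmask := mask_eq n
  have hlt := maskNat_lt n
  have haltv : make_powers_alt n =
      ((List.range 30).filter (fun i => (maskNat n).testBit i)).map
        (fun i => ((2 ^ i : Nat) : Int)) := by
    rw [make_powers_alt, hmask,
        alt_go_spec 30 (maskNat n) [] (popcnt_le 30 _ hlt),
        ascBits_ref 30 (maskNat n) hlt]
    simp
  have hfilter :
      ((List.range 30).filter (fun i => (maskNat n).testBit i)) =
      ((List.range 30).filter (fun i => decide (((2 ^ i : Nat) : Int).land n ≠ 0))) := by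
    apply List.filter_congr
    intro i hi
    have hi30 : i < 30 := List.mem_range.mp hi
    have hb := bit_bridge n i hi30
    by_cases h : ((2 ^ i : Nat) : Int).land n = 0
    · have hf : (maskNat n).testBit i = false := by
        rcases hx : (maskNat n).testBit i with _ | _
        · rfl
        · exact absurd h (hb.mpr hx)
      push_cast at h
      simp [hf, h]
    · have ht := hb.mp h
      push_cast at h
      simp [ht, h]
  have hA : make_powers_go 0b100000000000000000000000000000 n [] =
      (((List.range 30).filter
          (fun i => decide (((2 ^ i : Nat) : Int).land n ≠ 0))).map
          (fun i => ((2 ^ i : Nat) : Int))).reverse := by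
    have : (0b100000000000000000000000000000 : Nat) = 2 ^ 29 := by norm_num
    rw [this, go_spec n 29 []]
    simp
  rw [make_powers, hA, haltv, hfilter]
  exact PySem.List.sorted_eq_of_perm_of_pairwise_lt _ _ _
    ((List.reverse_perm _).symm) (ref_pairwise n)
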